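-- pv_equiv track=rewrite | github.com/DMXFabian1/pos_uniformes | pos_uniformes/ui/helpers/settings_whatsapp_preview_helper.py | build_settings_whatsapp_preview_text
-- ===== SOURCE A (Python) =====
-- def build_settings_whatsapp_preview_text(
--     template_key: str,
--     template_map: dict[str, str],
--     default_templates: dict[str, str],
-- ) -> str:
--     sample_values = {
--         "cliente": "Ana Perez",
--         "folio": "APT-20260311-AB12",
--         "saldo": "350.00",
--         "vencimiento": "Vence hoy",
--         "fecha_compromiso": "2026-03-11",
--         "codigo_cliente": "CLI-000125",
--     }
--     template_text = template_map.get(template_key) or default_templates.get(template_key, "")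
--     rendered = template_text
--     for key, value in sample_values.items():
--         rendered = rendered.replace(f"{{{key}}}", str(value))
--     return rendered
-- ===== SOURCE B (Python) =====
-- def build_settings_whatsapp_preview_text(
--     template_key: str,
--     template_map: dict[str, str],
--     default_templates: dict[str, str],
-- ) -> str:
--     sample_tokens = {
--         "{cliente}": "Ana Perez",
--         "{folio}": "APT-20260311-AB12",
--         "{saldo}": "350.00",
--         "{vencimiento}": "Vence hoy",
--         "{fecha_compromiso}": "2026-03-11",
--         "{codigo_cliente}": "CLI-000125",
--     }
--     template_text = template_map.get(template_key) or default_templates.get(template_key, "")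
--     # single left-to-right pass: at each position try the six "{key}" tokens at once
--     out = []
--     i = 0
--     n = len(template_text)
--     while i < n:
--         for token, value in sample_tokens.items():
--             if template_text.startswith(token, i):
--                 out.append(value)
--                 i += len(token)
--                 break
--         else:
--             out.append(template_text[i])
--             i += 1
--     return "".join(out)
-- ===== Notes on version B (the rewrite author's own statement) =====
-- stated objective: alternative
-- what changed: Replaces the six sequential full-string str.replace passes by a single left-to-right scan that tries all six '{key}' tokens simultaneously at each position and emits the sample value or the character.
import Mathlib
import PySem

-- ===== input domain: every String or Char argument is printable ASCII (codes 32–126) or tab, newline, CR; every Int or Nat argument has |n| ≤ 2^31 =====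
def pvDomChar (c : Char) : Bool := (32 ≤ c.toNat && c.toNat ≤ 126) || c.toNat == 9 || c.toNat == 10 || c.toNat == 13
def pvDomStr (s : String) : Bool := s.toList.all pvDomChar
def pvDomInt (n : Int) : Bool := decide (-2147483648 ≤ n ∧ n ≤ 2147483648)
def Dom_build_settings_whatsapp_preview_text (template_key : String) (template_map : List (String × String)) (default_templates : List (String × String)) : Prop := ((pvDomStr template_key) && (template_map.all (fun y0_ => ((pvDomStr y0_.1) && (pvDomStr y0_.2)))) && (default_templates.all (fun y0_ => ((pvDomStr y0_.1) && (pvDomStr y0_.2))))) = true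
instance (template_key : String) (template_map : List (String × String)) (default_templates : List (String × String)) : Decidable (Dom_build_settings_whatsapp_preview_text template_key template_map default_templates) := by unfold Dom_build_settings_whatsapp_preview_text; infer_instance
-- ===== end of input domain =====

-- B replaces A's six sequential full-string replace passes by one left-to-right scan that
-- tries all six "{key}" tokens simultaneously at each position (alternative decomposition).


-- shared by both ports (verbatim-identical lines in both Pythons):
-- the sample_values dict literal, and
-- template_text = template_map.get(template_key) or default_templates.get(template_key, "")
def pvSampleValues : List (String × String) :=
  [("cliente", "Ana Perez"), ("folio", "APT-20260311-AB12"), ("saldo", "350.00"),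
   ("vencimiento", "Vence hoy"), ("fecha_compromiso", "2026-03-11"),
   ("codigo_cliente", "CLI-000125")]

-- dict.get on an association list: first match
def pvLookup (m : List (String × String)) (k : String) : Option String :=
  (m.find? (fun p => p.1 == k)).map (·.2)

-- `template_map.get(key) or default_templates.get(key, "")` ("" and None are falsy)
def pvFetchTemplate (template_key : String) (template_map : List (String × String))
    (default_templates : List (String × String)) : String :=
  match pvLookup template_map template_key with
  | some s => if s = "" then (pvLookup default_templates template_key).getD "" else s
  | none => (pvLookup default_templates template_key).getD ""

-- ===== PORT A =====
-- for key, value in sample_values.items(): rendered = rendered.replace("{"+key+"}", value)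
def build_settings_whatsapp_preview_text (template_key : String) (template_map : List (String × String)) (default_templates : List (String × String)) : String :=
  List.foldl (fun rendered kv => PySem.Str.replace rendered ("{" ++ kv.1 ++ "}") kv.2)
    (pvFetchTemplate template_key template_map default_templates) pvSampleValues

-- ===== PORT B =====
-- B's sample_tokens dict: the six "{key}" -> value pairs, as char lists
def pvTokens : List (List Char × List Char) :=
  [("{cliente}".toList, "Ana Perez".toList), ("{folio}".toList, "APT-20260311-AB12".toList),
   ("{saldo}".toList, "350.00".toList), ("{vencimiento}".toList, "Vence hoy".toList),
   ("{fecha_compromiso}".toList, "2026-03-11".toList),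
   ("{codigo_cliente}".toList, "CLI-000125".toList)]

-- B's while loop: at each position try the tokens in dict order (the for/else);
-- on a match emit the value and jump past the token, else emit the character.
def pvScan (T : List (List Char × List Char)) : List Char → List Char
  | [] => []
  | c :: cs =>
    match T.find? (fun e => e.1.isPrefixOf (c :: cs)) with
    | some e => e.2 ++ pvScan T (cs.drop (e.1.length - 1))
    | none => c :: pvScan T cs
  termination_by s => s.length
  decreasing_by
  · simp only [List.length_drop, List.length_cons]; omega
  · simp

def build_settings_whatsapp_preview_text_alt (template_key : String) (template_map : List (String × String)) (default_templates : List (String × String)) : String :=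
  String.ofList (pvScan pvTokens (pvFetchTemplate template_key template_map default_templates).toList)

-- ===== PRECONDITION & SPEC =====
def Spec_build_settings_whatsapp_preview_text (template_key : String) (template_map : List (String × String)) (default_templates : List (String × String)) (out : String) : Prop := out = build_settings_whatsapp_preview_text_alt template_key template_map default_templates
instance (template_key : String) (template_map : List (String × String)) (default_templates : List (String × String)) (out : String) : Decidable (Spec_build_settings_whatsapp_preview_text template_key template_map default_templates out) := by unfold Spec_build_settings_whatsapp_preview_text; infer_instance

-- ===== CLAIM (what is proved, stated in full; the proofs are below) =====
def Claim_equal_build_settings_whatsapp_preview_text : Prop := ∀ (template_key : String) (template_map : List (String × String)) (default_templates : List (String × String)), Dom_build_settings_whatsapp_preview_text template_key template_map default_templates → Spec_build_settings_whatsapp_preview_text template_key template_map default_templates (build_settings_whatsapp_preview_text template_key template_map default_templates)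

-- ===== LEMMAS AND PROOFS =====

-- a structural recursion computing Python's str.replace (pattern nonempty)
def pvRepl (p v : List Char) : List Char → List Char
  | [] => []
  | c :: cs =>
    if p.isPrefixOf (c :: cs) then v ++ pvRepl p v (cs.drop (p.length - 1))
    else c :: pvRepl p v cs
  termination_by s => s.length
  decreasing_by
  · simp only [List.length_drop, List.length_cons]; omega
  · simp

-- token shape "{name}" (no inner braces); value shape (nonempty, brace-free)
def pvTok (p : List Char) : Prop :=
  ∃ inner, p = '{' :: (inner ++ ['}']) ∧ '{' ∉ inner ∧ '}' ∉ inner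
def pvVal (v : List Char) : Prop := v ≠ [] ∧ '{' ∉ v ∧ '}' ∉ v

theorem pvRepl_go_eq (p v : List Char) (hp : p ≠ []) :
    ∀ fuel l acc, l.length ≤ fuel →
      PySem.Chars.replace.go p v fuel l acc = acc.reverse ++ pvRepl p v l := by
  intro fuel
  induction fuel with
  | zero =>
    intro l acc hl
    have : l = [] := List.length_eq_zero_iff.mp (Nat.le_zero.mp hl)
    subst this
    rw [PySem.Chars.replace.go, pvRepl]
  | succ n ih =>
    intro l acc hl
    cases l with
    | nil =>
      rw [PySem.Chars.replace.go, pvRepl]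
      simp
      all_goals omega
    | cons c t =>
      obtain ⟨ph, pt, rfl⟩ : ∃ ph pt, p = ph :: pt := by
        cases p with
        | nil => exact absurd rfl hp
        | cons a b => exact ⟨a, b, rfl⟩
      rw [PySem.Chars.replace.go]
      by_cases hpf : (ph :: pt).isPrefixOf (c :: t) = true
      · rw [if_pos hpf, pvRepl, if_pos hpf]
        have hlen : (List.drop (ph :: pt).length (c :: t)).length ≤ n := by
          simp only [List.length_drop, List.length_cons] at *
          omega
        rw [ih _ _ hlen]
        simp only [List.length_cons, List.reverse_append, List.reverse_reverse]
        simp [List.drop_succ_cons]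
      · rw [if_neg hpf, pvRepl, if_neg hpf]
        have hlen : t.length ≤ n := by simp at hl; omega
        rw [ih _ _ hlen]
        simp

theorem pvReplace_eq (p v s : List Char) (hp : p ≠ []) :
    PySem.Chars.replace s p v = pvRepl p v s := by
  rw [PySem.Chars.replace]
  rw [if_neg (by simpa [List.isEmpty_iff] using hp)]
  simpa using pvRepl_go_eq p v hp s.length s [] le_rfl

theorem pvScan_nil (s : List Char) : pvScan [] s = s := by
  induction s with
  | nil => rw [pvScan]
  | cons c cs ih => rw [pvScan]; simp [List.find?, ih]

theorem pvFind?_ext {α : Type} (P Q : α → Bool) (l : List α)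
    (h : ∀ a ∈ l, P a = Q a) : l.find? P = l.find? Q := by
  induction l with
  | nil => rfl
  | cons a l ih =>
    have ha := h a (by simp)
    rw [List.find?_cons, List.find?_cons, ha]
    cases hq : Q a with
    | true => rfl
    | false => exact ih (fun b hb => h b (by simp [hb]))

-- a brace-free block passes unchanged through the scan
theorem pvScan_pass (T : List (List Char × List Char)) (hT : ∀ e ∈ T, pvTok e.1)
    (v : List Char) (hv : '{' ∉ v) (z : List Char) :
    pvScan T (v ++ z) = v ++ pvScan T z := by
  induction v with
  | nil => simp
  | cons c v' ih =>
    have hcne : c ≠ '{' := by intro hc; exact hv (by simp [hc])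
    have hfind : T.find? (fun e => e.1.isPrefixOf (c :: (v' ++ z))) = none := by
      rw [List.find?_eq_none]
      intro a ha hcontra
      obtain ⟨inner, hpe, -, -⟩ := hT a ha
      have hpref := List.isPrefixOf_iff_prefix.mp hcontra
      rw [hpe] at hpref
      exact hcne ((List.cons_prefix_cons.mp hpref).1.symm)
    rw [List.cons_append, pvScan, hfind]
    simp only [List.cons_append]
    rw [ih (fun hc => hv (by simp [hc]))]

-- a brace-free block passes unchanged through replace with a '{'-led pattern
theorem pvRepl_pass (p v : List Char) (hp : ∃ t, p = '{' :: t)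
    (u : List Char) (hu : '{' ∉ u) (z : List Char) :
    pvRepl p v (u ++ z) = u ++ pvRepl p v z := by
  induction u with
  | nil => simp
  | cons c u' ih =>
    have hcne : c ≠ '{' := by intro hc; exact hu (by simp [hc])
    obtain ⟨t, ht⟩ := hp
    have hnp : ¬ p.isPrefixOf (c :: (u' ++ z)) = true := by
      intro hcontra
      have hpref := List.isPrefixOf_iff_prefix.mp hcontra
      rw [ht] at hpref
      exact hcne ((List.cons_prefix_cons.mp hpref).1.symm)
    rw [List.cons_append, pvRepl, if_neg hnp]
    simp only [List.cons_append]
    rw [ih (fun hc => hu (by simp [hc]))]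

-- no token tail "inner}" can newly appear as a prefix of a replace output
theorem pvStraddle (p v : List Char) (hv : pvVal v) (q : List Char) (hvq : ¬ v <:+: q) :
    ∀ n cs inner, cs.length ≤ n → '}' ∉ inner → (inner ++ ['}']) <:+: q →
      (inner ++ ['}']) <+: pvRepl p v cs → (inner ++ ['}']) <+: cs := by
  intro n
  induction n with
  | zero =>
    intro cs inner hlen _ _ hpref
    have : cs = [] := List.length_eq_zero_iff.mp (Nat.le_zero.mp hlen)
    subst this
    rw [pvRepl] at hpref
    simpa using List.prefix_nil.mp hpref
  | succ n ih =>
    intro cs inner hlen hni hinf hpref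
    cases cs with
    | nil =>
      rw [pvRepl] at hpref
      simpa using List.prefix_nil.mp hpref
    | cons c cs' =>
      rw [pvRepl] at hpref
      split at hpref
      · -- p matched: the prefix would have to end inside v or contain v: impossible
        rcases List.prefix_or_prefix_of_prefix hpref (List.prefix_append v _) with h | h
        · exact absurd (h.sublist.mem (by simp)) hv.2.2
        · exact absurd (h.isInfix.trans hinf) hvq
      · cases inner with
        | nil =>
          have hc : '}' = c := by simpa using hpref
          simp [List.cons_prefix_cons, ← hc]
        | cons d inner' =>
          have h2 : d = c ∧ inner' ++ ['}'] <+: pvRepl p v cs' := by simpa using hpref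
          have hstep : inner' ++ ['}'] <:+: (d :: inner') ++ ['}'] := ⟨[d], [], by simp⟩
          have hrec := ih cs' inner' (by simp at hlen; omega)
            (fun hm => hni (by simp [hm]))
            (hstep.trans hinf)
            h2.2
          show (d :: inner') ++ ['}'] <+: c :: cs'
          rw [List.cons_append]
          exact List.cons_prefix_cons.mpr ⟨h2.1, hrec⟩

-- among "{...}" tokens mutually non-prefix, prefixing y (which q prefixes) means being q
theorem pvTokPrefix (toks : List (List Char × List Char))
    (hpre : ∀ e ∈ toks, ∀ e' ∈ toks, e.1 <+: e'.1 → e.1 = e'.1)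
    (q y : List Char) (hq : ∃ e ∈ toks, e.1 = q) (hqy : q <+: y) :
    ∀ e ∈ toks, (e.1 <+: y ↔ e.1 = q) := by
  intro e he
  obtain ⟨eq, heq, rfl⟩ := hq
  constructor
  · intro hey
    rcases List.prefix_or_prefix_of_prefix hey hqy with h | h
    · exact hpre e he eq heq h
    · exact (hpre eq heq e he h).symm
  · intro h; rw [h]; exact hqy

theorem pvScan_cons_some (T : List (List Char × List Char)) (c : Char) (cs : List Char)
    (e : List Char × List Char)
    (h : T.find? (fun a => a.1.isPrefixOf (c :: cs)) = some e) :
    pvScan T (c :: cs) = e.2 ++ pvScan T (cs.drop (e.1.length - 1)) := by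
  rw [pvScan, h]

theorem pvScan_cons_none (T : List (List Char × List Char)) (c : Char) (cs : List Char)
    (h : T.find? (fun a => a.1.isPrefixOf (c :: cs)) = none) :
    pvScan T (c :: cs) = c :: pvScan T cs := by
  rw [pvScan, h]

-- MAIN: scanning after one more replace = scanning with the token added in front
theorem pvScan_repl (p v : List Char) (T : List (List Char × List Char))
    (hp : pvTok p) (hv : pvVal v)
    (hT : ∀ e ∈ T, pvTok e.1)
    (hpre : ∀ e ∈ T, ∀ e' ∈ T, e.1 <+: e'.1 → e.1 = e'.1)
    (hinf : ∀ e ∈ T, ¬ v <:+: e.1) :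
    ∀ n s, s.length ≤ n → pvScan T (pvRepl p v s) = pvScan ((p, v) :: T) s := by
  intro n
  induction n with
  | zero =>
    intro s hs
    have hnil : s = [] := List.length_eq_zero_iff.mp (Nat.le_zero.mp hs)
    subst hnil
    rw [pvRepl]
    simp [pvScan]
  | succ n ih =>
    intro s hs
    cases s with
    | nil => rw [pvRepl]; simp [pvScan]
    | cons c cs =>
      obtain ⟨pinner, hpe, hpin1, hpin2⟩ := hp
      by_cases hpf : p.isPrefixOf (c :: cs) = true
      · -- p matches at this position
        rw [pvRepl, if_pos hpf]
        rw [pvScan_pass T hT v hv.2.1]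
        have hf : ((p, v) :: T).find? (fun a => a.1.isPrefixOf (c :: cs)) = some (p, v) :=
          List.find?_cons_of_pos (p := fun a : List Char × List Char => a.1.isPrefixOf (c :: cs)) hpf
        rw [pvScan_cons_some ((p, v) :: T) c cs (p, v) hf]
        have hlen : (cs.drop (p.length - 1)).length ≤ n := by
          simp only [List.length_drop]
          simp only [List.length_cons] at hs
          omega
        rw [ih _ hlen]
      · -- p does not match at this position
        rw [pvRepl, if_neg hpf]
        cases hfind : T.find? (fun a => a.1.isPrefixOf (c :: cs)) with
        | some e =>
          have heT := List.mem_of_find?_eq_some hfind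
          have hq' : (fun a : List Char × List Char => a.1.isPrefixOf (c :: cs)) e = true :=
            @List.find?_some _ (fun a : List Char × List Char => a.1.isPrefixOf (c :: cs)) e T hfind
          have hq : e.1 <+: (c :: cs) := List.isPrefixOf_iff_prefix.mp (by simpa using hq')
          obtain ⟨inner, hpe2, hin1, hin2⟩ := hT e heT
          have hsplit := List.prefix_iff_eq_append.mp hq
          have hcc : '{' :: ((inner ++ ['}']) ++ List.drop e.1.length (c :: cs)) = c :: cs := by
            conv_rhs => rw [← hsplit]
            rw [hpe2]
            simp
          injection hcc with hc1 hc2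
          subst hc1
          set rest := List.drop e.1.length ('{' :: cs) with hrest
          have hpassu : '{' ∉ inner ++ ['}'] := by
            intro hm
            rcases List.mem_append.mp hm with h | h
            · exact hin1 h
            · simp at h
          have hr : '{' :: pvRepl p v cs = e.1 ++ pvRepl p v rest := by
            rw [← hc2]
            rw [pvRepl_pass p v ⟨pinner ++ ['}'], hpe⟩ (inner ++ ['}']) hpassu rest]
            rw [hpe2]
            simp
          rw [hr]
          have e1cons : e.1 ++ pvRepl p v rest = '{' :: ((inner ++ ['}']) ++ pvRepl p v rest) := by
            rw [hpe2]; simp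
          have hptw : ∀ a ∈ T, (fun a : List Char × List Char => a.1.isPrefixOf (e.1 ++ pvRepl p v rest)) a
              = (fun a : List Char × List Char => a.1.isPrefixOf ('{' :: cs)) a := by
            intro a ha
            simp only
            have hiff := pvTokPrefix T hpre e.1 (e.1 ++ pvRepl p v rest) ⟨e, heT, rfl⟩ (List.prefix_append _ _) a ha
            have hiff2 := pvTokPrefix T hpre e.1 ('{' :: cs) ⟨e, heT, rfl⟩ hq a ha
            cases hb : (a.1.isPrefixOf ('{' :: cs)) with
            | true =>
              have ha1 : a.1 = e.1 := hiff2.mp (List.isPrefixOf_iff_prefix.mp hb)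
              exact List.isPrefixOf_iff_prefix.mpr (hiff.mpr ha1)
            | false =>
              refine Bool.eq_false_iff.mpr (fun htrue => ?_)
              have ha1 := hiff.mp (List.isPrefixOf_iff_prefix.mp htrue)
              have hb2 := List.isPrefixOf_iff_prefix.mpr (hiff2.mpr ha1)
              rw [hb] at hb2
              exact Bool.false_ne_true hb2
          have hext := pvFind?_ext (fun a : List Char × List Char => a.1.isPrefixOf (e.1 ++ pvRepl p v rest))
            (fun a => a.1.isPrefixOf ('{' :: cs)) T hptw
          have hfind2' : T.find? (fun a : List Char × List Char => a.1.isPrefixOf (e.1 ++ pvRepl p v rest)) = some e := by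
            rw [hext]; exact hfind
          have hfind2 : T.find? (fun a : List Char × List Char => a.1.isPrefixOf ('{' :: ((inner ++ ['}']) ++ pvRepl p v rest))) = some e := by
            rw [← e1cons]; exact hfind2'
          rw [e1cons, pvScan_cons_some T '{' ((inner ++ ['}']) ++ pvRepl p v rest) e hfind2]
          have hlen1 : e.1.length - 1 = (inner ++ ['}']).length := by rw [hpe2]; simp
          rw [hlen1, List.drop_left]
          have hlen2 : e.1.length = inner.length + 2 := by rw [hpe2]; simp
          have hlenr : rest.length ≤ n := by
            rw [hrest]
            simp only [List.length_drop, List.length_cons]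
            simp only [List.length_cons] at hs
            omega
          rw [ih rest hlenr]
          have hf3 : ((p, v) :: T).find? (fun a => a.1.isPrefixOf ('{' :: cs)) = some e := by
            rw [List.find?_cons_of_neg (p := fun a : List Char × List Char => a.1.isPrefixOf ('{' :: cs)) hpf]
            exact hfind
          rw [pvScan_cons_some ((p, v) :: T) '{' cs e hf3]
          have hdrop2 : cs.drop (e.1.length - 1) = rest := by
            rw [hrest, hlen2]
            simp [List.drop_succ_cons]
          rw [hdrop2]
        | none =>
          have hnone := List.find?_eq_none.mp hfind
          have hfind2 : T.find? (fun a => a.1.isPrefixOf (c :: pvRepl p v cs)) = none := by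
            rw [List.find?_eq_none]
            intro a ha hcontra
            obtain ⟨inner, hpe2, hin1, hin2⟩ := hT a ha
            have hpref := List.isPrefixOf_iff_prefix.mp hcontra
            rw [hpe2] at hpref
            have h2 := List.cons_prefix_cons.mp hpref
            have hy := pvStraddle p v hv a.1 (hinf a ha) cs.length cs inner le_rfl hin2
              (by rw [hpe2]; exact ⟨['{'], [], by simp⟩) h2.2
            exact hnone a ha (List.isPrefixOf_iff_prefix.mpr (by rw [hpe2]; exact List.cons_prefix_cons.mpr ⟨h2.1, hy⟩))
          rw [pvScan_cons_none T c (pvRepl p v cs) hfind2]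
          have hf3 : ((p, v) :: T).find? (fun a => a.1.isPrefixOf (c :: cs)) = none := by
            rw [List.find?_cons_of_neg (p := fun a : List Char × List Char => a.1.isPrefixOf (c :: cs)) hpf]
            exact hfind
          rw [pvScan_cons_none ((p, v) :: T) c cs hf3]
          have hlc : cs.length ≤ n := by simp only [List.length_cons] at hs; omega
          rw [ih cs hlc]

-- fold of replaces = simultaneous scan
theorem pvFold (T₁ T₂ : List (List Char × List Char))
    (h1 : ∀ e ∈ T₁ ++ T₂, pvTok e.1) (h2 : ∀ e ∈ T₁ ++ T₂, pvVal e.2)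
    (h3 : ∀ e ∈ T₁ ++ T₂, ∀ e' ∈ T₁ ++ T₂, e.1 <+: e'.1 → e.1 = e'.1)
    (h4 : ∀ e ∈ T₁ ++ T₂, ∀ e' ∈ T₁ ++ T₂, ¬ e.2 <:+: e'.1) (s : List Char) :
    pvScan T₂ (List.foldl (fun r e => pvRepl e.1 e.2 r) s T₁) = pvScan (T₁ ++ T₂) s := by
  revert h1 h2 h3 h4
  induction T₁ using List.reverseRecOn generalizing T₂ s with
  | nil => intro _ _ _ _; simp
  | append_singleton T₁' e ih =>
    intro h1 h2 h3 h4
    rw [List.foldl_append, List.foldl_cons, List.foldl_nil]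
    have hM := pvScan_repl e.1 e.2 T₂
      (h1 e (by simp)) (h2 e (by simp))
      (fun a ha => h1 a (by simp [ha]))
      (fun a ha b hb => h3 a (by simp [ha]) b (by simp [hb]))
      (fun a ha => h4 e (by simp) a (by simp [ha]))
    rw [hM (List.foldl (fun r e => pvRepl e.1 e.2 r) s T₁').length _ le_rfl]
    rw [List.append_assoc, List.singleton_append] at h1 h2 h3 h4 ⊢
    exact ih (e :: T₂) s h1 h2 h3 h4

-- the string-level fold of A equals the char-level fold of pvRepl over pvTokens
theorem pvFoldStr (tbl : List (String × String)) (t : String) :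
    (List.foldl (fun r kv => PySem.Str.replace r ("{" ++ kv.1 ++ "}") kv.2) t tbl).toList
      = List.foldl (fun r e => pvRepl e.1 e.2 r) t.toList
          (tbl.map (fun kv => (("{" ++ kv.1 ++ "}").toList, kv.2.toList))) := by
  induction tbl generalizing t with
  | nil => simp
  | cons kv tbl' ih =>
    simp only [List.foldl_cons, List.map_cons]
    rw [ih]
    congr 1
    rw [PySem.Str.toList_replace]
    have hne : ("{" ++ kv.1 ++ "}").toList ≠ [] := by simp [String.toList_append]
    rw [pvReplace_eq _ _ _ hne]

-- concrete-table facts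
theorem pvTokens_tok : ∀ e ∈ pvTokens, pvTok e.1 := by
  intro e he
  simp only [pvTokens, List.mem_cons, List.not_mem_nil, or_false] at he
  rcases he with h | h | h | h | h | h <;> subst h
  · exact ⟨"cliente".toList, by decide, by decide, by decide⟩
  · exact ⟨"folio".toList, by decide, by decide, by decide⟩
  · exact ⟨"saldo".toList, by decide, by decide, by decide⟩
  · exact ⟨"vencimiento".toList, by decide, by decide, by decide⟩
  · exact ⟨"fecha_compromiso".toList, by decide, by decide, by decide⟩
  · exact ⟨"codigo_cliente".toList, by decide, by decide, by decide⟩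
theorem pvTokens_val : ∀ e ∈ pvTokens, pvVal e.2 := by
  intro e he
  simp only [pvTokens, List.mem_cons, List.not_mem_nil, or_false] at he
  rcases he with h | h | h | h | h | h <;> subst h <;> exact ⟨by decide, by decide, by decide⟩
theorem pvTokens_pre : ∀ e ∈ pvTokens, ∀ e' ∈ pvTokens, e.1 <+: e'.1 → e.1 = e'.1 := by
  intro e he e' he'
  simp only [pvTokens, List.mem_cons, List.not_mem_nil, or_false] at he he'
  rw [← List.isPrefixOf_iff_prefix]
  rcases he with h | h | h | h | h | h <;> subst h <;>
    rcases he' with h' | h' | h' | h' | h' | h' <;> subst h' <;> decide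
theorem pvTokens_inf : ∀ e ∈ pvTokens, ∀ e' ∈ pvTokens, ¬ e.2 <:+: e'.1 := by
  intro e he e' he'
  simp only [pvTokens, List.mem_cons, List.not_mem_nil, or_false] at he he'
  rw [← PySem.Chars.isIn_eq_false_iff]
  rcases he with h | h | h | h | h | h <;> subst h <;>
    rcases he' with h' | h' | h' | h' | h' | h' <;> subst h' <;> decide

-- ===== VERDICT (by name: the statement is the Claim_ definition above) =====
theorem build_settings_whatsapp_preview_text_spec : Claim_equal_build_settings_whatsapp_preview_text := by
  intro template_key template_map default_templates _
  unfold Spec_build_settings_whatsapp_preview_text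
  unfold build_settings_whatsapp_preview_text build_settings_whatsapp_preview_text_alt
  set t := pvFetchTemplate template_key template_map default_templates with ht
  have h1 := pvTokens_tok
  have h2 := pvTokens_val
  have h3 := pvTokens_pre
  have h4 := pvTokens_inf
  have hfold := pvFold pvTokens [] (by simpa using h1) (by simpa using h2)
    (by simpa using h3) (by simpa using h4) t.toList
  rw [List.append_nil] at hfold
  have hA : (List.foldl (fun rendered kv => PySem.Str.replace rendered ("{" ++ kv.1 ++ "}") kv.2) t pvSampleValues).toList
      = pvScan pvTokens t.toList := by
    rw [pvFoldStr]
    have : (pvSampleValues.map (fun kv => (("{" ++ kv.1 ++ "}").toList, kv.2.toList))) = pvTokens := by decide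
    rw [this, ← hfold, pvScan_nil]
  calc List.foldl (fun rendered kv => PySem.Str.replace rendered ("{" ++ kv.1 ++ "}") kv.2) t pvSampleValues
      = String.ofList (List.foldl (fun rendered kv => PySem.Str.replace rendered ("{" ++ kv.1 ++ "}") kv.2) t pvSampleValues).toList := by
        rw [String.ofList_toList]
    _ = String.ofList (pvScan pvTokens t.toList) := by rw [hA]
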